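-- pv_equiv track=rewrite | github.com/MrBrantCode/unitest_baseline | mut_generate/mist_train_cf/cf_48352/solution.py | beneficial_partitions
-- ===== SOURCE A (Python) =====
-- def beneficial_partitions(s):
--     if not s: return 0
--
--     n = len(s)
--     beneficial_divisions = 0
--
--     prefix_ways = [0]*n
--     suffix_ways = [0]*n
--     prefix_set = set()
--     suffix_set = [set() for _ in range(n)]
--
--     for i in range(n):
--         prefix_set.add(s[i])
--         prefix_ways[i] = len(prefix_set)
--
--     for i in reversed(range(n)):
--         suffix_set[i] = suffix_set[i+1].copy() if i+1 < n else set()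
--         suffix_set[i].add(s[i])
--         suffix_ways[i] = len(suffix_set[i])
--
--     for i in range(n-1):
--         if prefix_ways[i] == suffix_ways[i+1]:
--             beneficial_divisions += 1
--
--     return beneficial_divisions
-- ===== SOURCE B (Python) =====
-- def beneficial_partitions(s):
--     n = len(s)
--     total = sum(1 for i in range(n) if s.find(s[i]) == i)
--     count = p = q = 0
--     for i in range(n - 1):
--         ch = s[i]
--         if s.find(ch) == i:
--             p += 1
--         if s.find(ch, i + 1) == -1:
--             q += 1
--         if p == total - q:
--             count += 1
--     return count
-- ===== Notes on version B (the rewrite author's own statement) =====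
-- stated objective: alternative
-- what changed: A builds a running prefix set, per-index copied suffix sets and three arrays over three passes; B uses no sets or arrays at all: it counts first-occurrence positions (s.find(ch) == i) for the prefix-distinct count and last-occurrence positions (s.find(ch, i+1) == -1) for the suffix-distinct count (suffix-distinct = total - last-occurrences-so-far) in a single loop. Mechanism: no per-index set copies or set hashing; the occurrence tests are C-level str.find scans.
import Mathlib
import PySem

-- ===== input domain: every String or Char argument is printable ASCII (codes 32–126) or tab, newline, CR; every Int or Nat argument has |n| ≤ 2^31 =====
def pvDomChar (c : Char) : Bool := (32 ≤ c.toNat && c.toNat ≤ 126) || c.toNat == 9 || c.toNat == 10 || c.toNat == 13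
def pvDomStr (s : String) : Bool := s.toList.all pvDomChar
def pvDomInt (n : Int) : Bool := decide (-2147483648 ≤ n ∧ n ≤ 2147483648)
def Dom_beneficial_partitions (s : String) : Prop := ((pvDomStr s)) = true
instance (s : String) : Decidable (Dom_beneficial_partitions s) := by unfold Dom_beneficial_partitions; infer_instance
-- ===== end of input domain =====

-- B drops A's sets and arrays entirely: it counts first-occurrence positions (s.find(ch) == i) for
-- the prefix-distinct count and last-occurrence positions (s.find(ch, i+1) == -1) for the
-- suffix-distinct count (suffix = total - last-occurrences-so-far), in one loop.
-- Equivalence proved for all strings.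


-- ===== PORT A =====
-- A's second loop: for i in reversed(range(n)): suffix_set[i] = copy of suffix_set[i+1] (or set()), add s[i].
-- Ported as the structural right-to-left recursion building the list suffix_set[0..n-1] of sets.
def bpSuffixSets (cs : List Char) : List (PySem.Set Char) :=
  match cs with
  | [] => []
  | c :: rest =>
    let tl := bpSuffixSets rest
    PySem.Set.add (tl.headD PySem.Set.empty) c :: tl

def beneficial_partitions (s : String) : Int :=
  let cs := s.toList
  if cs = [] then 0
  else
    -- first loop: running prefix set, prefix_ways[i] = len after adding s[i]
    let prefix_ways := (cs.foldl (fun (st : PySem.Set Char × List Int) c =>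
        let ps := PySem.Set.add st.1 c
        (ps, st.2 ++ [PySem.Set.len ps])) (PySem.Set.empty, [])).2
    let suffix_ways := (bpSuffixSets cs).map (fun t => PySem.Set.len t)
    -- third loop: for i in range(n-1): compare prefix_ways[i] with suffix_ways[i+1]
    (prefix_ways.zip (suffix_ways.drop 1)).foldl
      (fun acc pr => if pr.1 == pr.2 then acc + 1 else acc) 0

-- ===== PORT B =====
def beneficial_partitions_alt (s : String) : Int :=
  let cs := s.toList
  let n : Int := cs.length
  let total : Int := ((PySem.List.pyRange 0 n 1).map (fun i =>
      if PySem.Chars.find cs [PySem.List.pyGetD cs i ' '] = i then (1 : Int) else 0)).sum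
  ((PySem.List.pyRange 0 (n - 1) 1).foldl (fun (st : Int × Int × Int) i =>
      let c := PySem.List.pyGetD cs i ' '
      let p := if PySem.Chars.find cs [c] = i then st.2.1 + 1 else st.2.1
      let q := if PySem.Chars.findFrom cs [c] (i + 1) none = -1 then st.2.2 + 1 else st.2.2
      (if p = total - q then st.1 + 1 else st.1, p, q)) ((0 : Int), (0 : Int), (0 : Int))).1

-- ===== PRECONDITION & SPEC =====
def Spec_beneficial_partitions (s : String) (out : Int) : Prop := out = beneficial_partitions_alt s
instance (s : String) (out : Int) : Decidable (Spec_beneficial_partitions s out) := by unfold Spec_beneficial_partitions; infer_instance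

-- ===== CLAIM (what is proved, stated in full; the proofs are below) =====
def Claim_equal_beneficial_partitions : Prop := ∀ (s : String), Dom_beneficial_partitions s → Spec_beneficial_partitions s (beneficial_partitions s)

-- ===== LEMMAS AND PROOFS =====

-- the number of distinct characters of l, as an Int
def bpD (l : List Char) : Int := ((PySem.Set.ofList l).length : Int)

lemma bpD_nil : bpD [] = 0 := rfl

lemma bpD_append_singleton (l : List Char) (c : Char) :
    bpD (l ++ [c]) = if c ∈ l then bpD l else bpD l + 1 := by
  unfold bpD
  rw [PySem.Set.ofList_append_singleton, PySem.Set.add_eq_ite]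
  by_cases h : c ∈ l
  · simp [h, PySem.Set.mem_ofList]
  · simp [h, PySem.Set.mem_ofList]

lemma bpD_reverse (l : List Char) : bpD l.reverse = bpD l := by
  unfold bpD
  have hperm : (PySem.Set.ofList l.reverse).Perm (PySem.Set.ofList l) := by
    apply (List.perm_ext_iff_of_nodup (PySem.Set.nodup_ofList _) (PySem.Set.nodup_ofList _)).mpr
    intro x; simp [PySem.Set.mem_ofList]
  exact_mod_cast hperm.length_eq

lemma bpD_cons (c : Char) (l : List Char) :
    bpD (c :: l) = if c ∈ l then bpD l else bpD l + 1 := by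
  rw [← bpD_reverse (c :: l), List.reverse_cons, bpD_append_singleton, bpD_reverse]
  by_cases h : c ∈ l
  · simp [h]
  · simp [h]

-- the common reference value: number of splits i (0 ≤ i < n-1) with equal distinct counts
def bpRef (cs : List Char) : Int :=
  ((List.range (cs.length - 1)).map (fun i =>
    if bpD (cs.take (i + 1)) = bpD (cs.drop (i + 1)) then (1 : Int) else 0)).sum

-- ---- A-side lemmas ----

def bpCnt : List (Int × Int) → Int
  | [] => 0
  | pr :: l => (if pr.1 == pr.2 then 1 else 0) + bpCnt l

lemma bpFoldA (l : List (Int × Int)) (a : Int) :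
    l.foldl (fun acc pr => if pr.1 == pr.2 then acc + 1 else acc) a = a + bpCnt l := by
  induction l generalizing a with
  | nil => simp [bpCnt]
  | cons pr l ih => simp only [List.foldl_cons, bpCnt, ih]; split <;> omega

lemma bpPrefixFold (l : List Char) :
    l.foldl (fun (st : PySem.Set Char × List Int) c =>
        let ps := PySem.Set.add st.1 c
        (ps, st.2 ++ [PySem.Set.len ps])) (PySem.Set.empty, [])
      = (PySem.Set.ofList l, (List.range l.length).map (fun i => bpD (l.take (i + 1)))) := by
  induction l using List.reverseRecOn with
  | nil => rfl
  | append_singleton l c ih =>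
    rw [List.foldl_append, ih]
    simp only [List.foldl_cons, List.foldl_nil, Prod.mk.injEq]
    refine ⟨(PySem.Set.ofList_append_singleton l c).symm, ?_⟩
    rw [List.length_append, List.length_singleton, List.range_succ, List.map_append,
      List.map_singleton]
    congr 1
    · apply List.map_congr_left; intro i hi
      rw [List.mem_range] at hi
      rw [List.take_append_of_le_length (by omega)]
    · congr 1
      show ((PySem.Set.add (PySem.Set.ofList l) c).length : Int) = _
      rw [← PySem.Set.ofList_append_singleton]
      show bpD (l ++ [c]) = _
      rw [List.take_of_length_le (by simp)]

lemma bpSuffixSets_eq (l : List Char) :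
    bpSuffixSets l = (List.range l.length).map (fun i => PySem.Set.ofList ((l.drop i).reverse)) := by
  induction l with
  | nil => rfl
  | cons c rest ih =>
    simp only [bpSuffixSets, ih]
    rw [List.length_cons, List.range_succ_eq_map]
    simp only [List.map_cons, List.map_map, Function.comp_def]
    refine List.cons_eq_cons.mpr ⟨?_, ?_⟩
    · cases rest with
      | nil => rfl
      | cons d t =>
        rw [List.length_cons, List.range_succ_eq_map]
        simp only [List.map_cons, List.headD_cons, List.drop_zero]
        rw [show (c :: d :: t).reverse = (d :: t).reverse ++ [c] by simp]
        exact (PySem.Set.ofList_append_singleton _ c).symm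
    · apply List.map_congr_left; intro i _; simp

lemma bpZipMapRange (n : Nat) (f g : Nat → Int) :
    (((List.range n).map f).zip (((List.range n).map g).drop 1))
      = (List.range (n - 1)).map (fun i => (f i, g (i + 1))) := by
  apply List.ext_getElem
  · simp
  · intro k h1 h2
    simp only [List.getElem_zip, List.getElem_map, List.getElem_drop, List.getElem_range,
      Prod.mk.injEq]
    exact ⟨trivial, by rw [Nat.add_comm]⟩

lemma bpCntMap (l : List Nat) (f g : Nat → Int) :
    bpCnt (l.map (fun i => (f i, g i)))
      = (l.map (fun i => if f i = g i then (1 : Int) else 0)).sum := by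
  induction l with
  | nil => rfl
  | cons x l ih =>
    simp only [List.map_cons, bpCnt, List.sum_cons, ih]
    by_cases h : f x = g x <;> simp [h]

lemma bpA_eq_ref (s : String) : beneficial_partitions s = bpRef s.toList := by
  unfold beneficial_partitions
  cases hcs : s.toList with
  | nil => simp [bpRef]
  | cons c t =>
    simp only [reduceCtorEq, if_false]
    rw [bpPrefixFold, bpSuffixSets_eq, bpFoldA]
    have hmap : ((List.range (c :: t).length).map
          (fun i => PySem.Set.ofList (((c :: t).drop i).reverse))).map (fun x => PySem.Set.len x)
        = (List.range (c :: t).length).map (fun i => bpD ((c :: t).drop i)) := by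
      rw [List.map_map]; apply List.map_congr_left; intro i _
      show ((PySem.Set.ofList _).length : Int) = _
      rw [show ((PySem.Set.ofList (((c :: t).drop i).reverse)).length : Int)
          = bpD (((c :: t).drop i).reverse) from rfl, bpD_reverse]
    show 0 + bpCnt _ = _
    rw [show (fun t => PySem.Set.len t) = (fun t : PySem.Set Char => PySem.Set.len t) from rfl]
    rw [hmap, bpZipMapRange, bpCntMap]
    simp only [bpRef, zero_add, List.length_cons]

-- ---- B-side lemmas ----

lemma bpGetTake (cs : List Char) (m : Nat) (hm : m < cs.length) :
    cs.take (m + 1) = cs.take m ++ [cs.getD m ' '] := by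
  rw [List.take_add_one, List.getElem?_eq_getElem hm, List.getD_eq_getElem cs ' ' hm]
  rfl

lemma bpGetDrop (cs : List Char) (m : Nat) (hm : m < cs.length) :
    cs.drop m = cs.getD m ' ' :: cs.drop (m + 1) := by
  rw [List.getD_eq_getElem cs ' ' hm]
  exact (List.drop_eq_getElem_cons hm)

lemma bpSingletonPrefix (c : Char) (l : List Char) : [c] <+: l ↔ l.head? = some c := by
  cases l with
  | nil => simp
  | cons a t =>
    constructor
    · intro h
      rcases h with ⟨r, hr⟩
      simp at hr
      simp [hr.1]
    · intro h
      simp at h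
      exact ⟨t, by simp [h]⟩

lemma bpPrefixDrop (c : Char) (l : List Char) (i : Nat) (hi : i < l.length) :
    [c] <+: l.drop i ↔ l.getD i ' ' = c := by
  rw [bpSingletonPrefix, List.head?_drop, List.getElem?_eq_getElem hi,
    List.getD_eq_getElem l ' ' hi]
  simp

-- 's.find(s[i]) == i' says position i is the FIRST occurrence of s[i]
lemma bpFindEq (cs : List Char) (m : Nat) (hm : m < cs.length) :
    (PySem.Chars.find cs [cs.getD m ' '] = (m : Int)) ↔ cs.getD m ' ' ∉ cs.take m := by
  set c := cs.getD m ' ' with hc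
  have hmem : c ∈ cs := by rw [hc, List.getD_eq_getElem cs ' ' hm]; exact List.getElem_mem hm
  have h0 : ((0 : Nat) : Int) = 0 := by norm_num
  have hne : PySem.Chars.find cs [c] ≠ -1 := by
    intro h
    have h' : PySem.Chars.findFrom cs [c] ((0 : Nat) : Int) none = -1 := by
      rw [h0, PySem.Chars.findFrom_zero]; exact h
    rw [PySem.Chars.findFrom_natCast_eq_neg_one_iff cs [c] 0 (by omega)] at h'
    exact h' (by simpa [List.singleton_infix_iff] using hmem)
  have hspec := PySem.Chars.findFrom_natCast_spec cs [c] 0 (by omega)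
      (by rw [h0, PySem.Chars.findFrom_zero]; exact hne)
  rw [h0, PySem.Chars.findFrom_zero] at hspec
  obtain ⟨hge0, hpre, hmin⟩ := hspec
  constructor
  · intro hfind hcm
    rcases List.mem_take_iff_getElem.mp hcm with ⟨j, hj, hcj⟩
    have hjm : j < m := by omega
    have : ¬ [c] <+: cs.drop j := hmin j (by omega) (by rw [hfind]; simpa using hjm)
    exact this ((bpPrefixDrop c cs j (by omega)).mpr
      (by rw [List.getD_eq_getElem cs ' ' (by omega)]; exact hcj))
  · intro hnot
    by_contra hfind
    rcases Nat.lt_or_ge (PySem.Chars.find cs [c]).toNat m with hl | hg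
    · have := (bpPrefixDrop c cs _ (by omega)).mp hpre
      exact hnot (List.mem_take_iff_getElem.mpr ⟨(PySem.Chars.find cs [c]).toNat,
        by omega, by rw [← List.getD_eq_getElem cs ' ' (by omega)]; exact this⟩)
    · have hm' : m < (PySem.Chars.find cs [c]).toNat := by omega
      exact hmin m (by omega) (by omega) ((bpPrefixDrop c cs m hm).mpr rfl)

-- 's.find(ch, i+1) == -1' says ch does not occur after position i
lemma bpFindFromEq (cs : List Char) (c : Char) (m : Nat) (hm : m + 1 ≤ cs.length) :
    (PySem.Chars.findFrom cs [c] ((m : Int) + 1) none = -1) ↔ c ∉ cs.drop (m + 1) := by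
  rw [show ((m : Int) + 1) = ((m + 1 : Nat) : Int) by push_cast; ring,
    PySem.Chars.findFrom_natCast_eq_neg_one_iff cs [c] (m + 1) hm]
  rw [List.singleton_infix_iff]

lemma bpTotal (cs : List Char) (m : Nat) (hm : m ≤ cs.length) :
    ((PySem.List.pyRange 0 (m : Int) 1).map (fun i =>
        if PySem.Chars.find cs [PySem.List.pyGetD cs i ' '] = i then (1 : Int) else 0)).sum
      = bpD (cs.take m) := by
  induction m with
  | zero => simp [bpD_nil]
  | succ m ih =>
    rw [show ((m + 1 : Nat) : Int) = (m : Int) + 1 by push_cast; ring,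
      PySem.List.pyRange_one_succ_right (by positivity), List.map_append, List.sum_append,
      ih (by omega)]
    rw [List.map_singleton, List.sum_singleton, PySem.List.pyGetD_natCast,
      bpGetTake cs m (by omega), bpD_append_singleton]
    have hiff := bpFindEq cs m (by omega)
    by_cases h : cs.getD m ' ' ∈ cs.take m
    · rw [if_neg (fun hf => (hiff.mp hf) h), if_pos h]
      omega
    · rw [if_pos (hiff.mpr h), if_neg h]

lemma bpBFold (cs : List Char) (total : Int) (htot : total = bpD cs)
    (m : Nat) (hm : m + 1 ≤ cs.length) :
    (PySem.List.pyRange 0 (m : Int) 1).foldl (fun (st : Int × Int × Int) i =>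
      let c := PySem.List.pyGetD cs i ' '
      let p := if PySem.Chars.find cs [c] = i then st.2.1 + 1 else st.2.1
      let q := if PySem.Chars.findFrom cs [c] (i + 1) none = -1 then st.2.2 + 1 else st.2.2
      (if p = total - q then st.1 + 1 else st.1, p, q)) ((0 : Int), (0 : Int), (0 : Int))
    = (((List.range m).map (fun i =>
          if bpD (cs.take (i + 1)) = bpD (cs.drop (i + 1)) then (1 : Int) else 0)).sum,
        bpD (cs.take m), total - bpD (cs.drop m)) := by
  induction m with
  | zero => simp [bpD_nil, htot]
  | succ m ih =>
    rw [show ((m + 1 : Nat) : Int) = (m : Int) + 1 by push_cast; ring,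
      PySem.List.pyRange_one_succ_right (by positivity), List.foldl_append,
      ih (by omega)]
    simp only [List.foldl_cons, List.foldl_nil, PySem.List.pyGetD_natCast]
    have hiffp := bpFindEq cs m (by omega)
    have hiffq := bpFindFromEq cs (cs.getD m ' ') m (by omega)
    have hp : (if PySem.Chars.find cs [cs.getD m ' '] = (m : Int)
          then bpD (cs.take m) + 1 else bpD (cs.take m)) = bpD (cs.take (m + 1)) := by
      rw [bpGetTake cs m (by omega), bpD_append_singleton]
      by_cases h : cs.getD m ' ' ∈ cs.take m
      · rw [if_neg (fun hf => (hiffp.mp hf) h), if_pos h]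
      · rw [if_pos (hiffp.mpr h), if_neg h]
    have hq : total - (if PySem.Chars.findFrom cs [cs.getD m ' '] ((m : Int) + 1) none = -1
          then total - bpD (cs.drop m) + 1 else total - bpD (cs.drop m))
        = bpD (cs.drop (m + 1)) := by
      have hd : bpD (cs.drop m) = if cs.getD m ' ' ∈ cs.drop (m + 1) then bpD (cs.drop (m + 1))
          else bpD (cs.drop (m + 1)) + 1 := by
        rw [bpGetDrop cs m (by omega)] ; exact bpD_cons _ _
      by_cases h : cs.getD m ' ' ∈ cs.drop (m + 1)
      · rw [if_pos h] at hd; rw [if_neg (fun hf => (hiffq.mp hf) h)]; omega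
      · rw [if_neg h] at hd; rw [if_pos (hiffq.mpr h)]; omega
    rw [List.range_succ, List.map_append, List.sum_append, List.map_singleton,
      List.sum_singleton]
    refine Prod.ext ?_ (Prod.ext (by simpa using hp) (by simp only []; omega))
    simp only []
    by_cases h : bpD (cs.take (m + 1)) = bpD (cs.drop (m + 1))
    · rw [if_pos h, if_pos (by rw [hp, hq]; exact h)]
    · rw [if_neg h, if_neg (by rw [hp, hq]; exact h)]; omega

lemma bpB_eq_ref (s : String) : beneficial_partitions_alt s = bpRef s.toList := by
  unfold beneficial_partitions_alt
  cases hcs : s.toList with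
  | nil => simp [bpRef]
  | cons c t =>
    simp only []
    rw [bpTotal (c :: t) (c :: t).length (le_refl _), List.take_length]
    rw [show (((c :: t).length : Int) - 1) = (((c :: t).length - 1 : Nat) : Int) by
      simp]
    rw [bpBFold (c :: t) _ rfl ((c :: t).length - 1) (by simp)]
    simp [bpRef]

-- ===== VERDICT (by name: the statement is the Claim_ definition above) =====
theorem beneficial_partitions_spec : Claim_equal_beneficial_partitions := by
  intro s _
  show beneficial_partitions s = beneficial_partitions_alt s
  rw [bpA_eq_ref, bpB_eq_ref]
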